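-- pv_equiv track=rewrite | github.com/JeroenEdeGroot/CS_2022 | deGroot_Jeroen_indAssignmentvF.py | actualDuplicates
-- ===== SOURCE A (Python) =====
-- def actualDuplicates(item_modelnumber,items):
--
--     duplicates = set()
--     for i in range(len(item_modelnumber)):
--         for j in range(len(item_modelnumber)):
--             if i != j:
--                 if j > i:
--                     if item_modelnumber[i] == item_modelnumber[j]:
--                         duplicates.add((items[i],items[j]))
--
--     return duplicates
-- ===== SOURCE B (Python) =====
-- def actualDuplicates(item_modelnumber, items):
--     # Group indices by modelnumber once, then emit ordered pairs only among group-mates.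
--     groups = {}
--     for idx, m in enumerate(item_modelnumber):
--         groups.setdefault(m, []).append(idx)
--     duplicates = set()
--     for i, m in enumerate(item_modelnumber):
--         for j in groups[m]:
--             if j > i:
--                 duplicates.add((items[i], items[j]))
--     return duplicates
-- ===== Notes on version B (the rewrite author's own statement) =====
-- stated objective: alternative
-- what changed: Replaces the all-pairs double scan with a dict grouping indices by modelnumber, so pairs are emitted only among indices of the same group (output-sensitive; not measurably faster on duplicate-heavy inputs whose output is itself quadratic).
import Mathlib
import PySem

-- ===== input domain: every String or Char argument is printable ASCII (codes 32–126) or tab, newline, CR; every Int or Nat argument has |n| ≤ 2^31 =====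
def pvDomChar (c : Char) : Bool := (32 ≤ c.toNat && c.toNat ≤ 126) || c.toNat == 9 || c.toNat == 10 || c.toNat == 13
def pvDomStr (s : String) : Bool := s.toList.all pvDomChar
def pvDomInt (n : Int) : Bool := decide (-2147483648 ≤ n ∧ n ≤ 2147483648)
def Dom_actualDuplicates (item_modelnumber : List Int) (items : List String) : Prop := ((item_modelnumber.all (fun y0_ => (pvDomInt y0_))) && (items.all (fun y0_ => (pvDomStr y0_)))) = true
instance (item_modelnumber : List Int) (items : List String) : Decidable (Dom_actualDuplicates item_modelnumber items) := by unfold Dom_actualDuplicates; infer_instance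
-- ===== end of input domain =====

-- B groups indices by modelnumber in one dict pass and emits ordered pairs only among group-mates,
-- replacing A's all-pairs double scan; Python A/B both return a set.

-- ===== PORT A =====
def actualDuplicates (item_modelnumber : List Int) (items : List String) : List (String × String) :=
  (PySem.List.pyRange 0 item_modelnumber.length 1).foldl (fun duplicates i =>
    (PySem.List.pyRange 0 item_modelnumber.length 1).foldl (fun duplicates j =>
      if i ≠ j then
        if j > i then
          if PySem.List.pyGetD item_modelnumber i 0 == PySem.List.pyGetD item_modelnumber j 0 then
            PySem.Set.add duplicates
              (PySem.List.pyGetD items i "", PySem.List.pyGetD items j "")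
          else duplicates
        else duplicates
      else duplicates) duplicates) []

-- ===== PORT B =====
def actualDuplicates_alt (item_modelnumber : List Int) (items : List String) : List (String × String) :=
  let groups : PySem.Dict Int (List Int) :=
    (PySem.List.enumerate item_modelnumber 0).foldl
      (fun d p => d.insert p.2 (d.getD p.2 [] ++ [p.1])) PySem.Dict.empty
  (PySem.List.enumerate item_modelnumber 0).foldl (fun duplicates p =>
    (groups.getD p.2 []).foldl (fun duplicates j =>
      if j > p.1 then
        PySem.Set.add duplicates
          (PySem.List.pyGetD items p.1 "", PySem.List.pyGetD items j "")
      else duplicates) duplicates) []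

-- ===== PRECONDITION & SPEC =====
-- Exactly the inputs on which A returns: A (and B) raises IndexError iff some pair i < j with
-- equal modelnumbers has j beyond the end of items.
def Pre_actualDuplicates (item_modelnumber : List Int) (items : List String) : Prop :=
  ∀ i ∈ List.range item_modelnumber.length, ∀ j ∈ List.range item_modelnumber.length,
    i < j → item_modelnumber.getD i 0 = item_modelnumber.getD j 0 → j < items.length
instance (item_modelnumber : List Int) (items : List String) : Decidable (Pre_actualDuplicates item_modelnumber items) := by unfold Pre_actualDuplicates; infer_instance
def pvWitness_actualDuplicates : List Int × List String := ([1, 2, 1], ["a", "b", "c"])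

def Spec_actualDuplicates (item_modelnumber : List Int) (items : List String) (out : List (String × String)) : Prop := out = actualDuplicates_alt item_modelnumber items
instance (item_modelnumber : List Int) (items : List String) (out : List (String × String)) : Decidable (Spec_actualDuplicates item_modelnumber items out) := by unfold Spec_actualDuplicates; infer_instance

-- ===== CLAIM (what is proved, stated in full; the proofs are below) =====
def Claim_equal_actualDuplicates : Prop := ∀ (item_modelnumber : List Int) (items : List String), Dom_actualDuplicates item_modelnumber items → Pre_actualDuplicates item_modelnumber items → Spec_actualDuplicates item_modelnumber items (actualDuplicates item_modelnumber items)

-- ===== LEMMAS AND PROOFS =====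

-- The grouping dict: looking up m yields exactly the indices whose model equals m, in order.
theorem getD_groups_fold (l : List (Int × Int)) (d : PySem.Dict Int (List Int)) (m : Int) :
    (l.foldl (fun d p => d.insert p.2 (d.getD p.2 [] ++ [p.1])) d).getD m []
      = l.foldl (fun acc p => if p.2 == m then acc ++ [p.1] else acc) (d.getD m []) := by
  induction l generalizing d with
  | nil => rfl
  | cons p l ih =>
    simp only [List.foldl_cons, ih]
    by_cases h : p.2 = m
    · subst h
      simp [PySem.Dict.getD_insert_self]
    · rw [PySem.Dict.getD_insert_of_ne]
      · simp [h]
      · exact fun hh => h hh.symm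
theorem actualDuplicates_spec : Claim_equal_actualDuplicates := by
  intro model items _ _
  unfold Spec_actualDuplicates actualDuplicates actualDuplicates_alt
  rw [PySem.List.enumerate_eq_map_pyRange model 0, List.foldl_map]
  congr 1
  funext dup i
  rw [getD_groups_fold]
  simp only [PySem.Dict.getD_empty, List.foldl_map, PySem.List.len_eq]
  rw [PySem.List.foldl_append_if_eq_filter, List.nil_append, List.foldl_filter]
  congr 1
  funext dup' j
  by_cases hb : PySem.List.pyGetD model i 0 == PySem.List.pyGetD model j 0
  · have hb' : PySem.List.pyGetD model j 0 == PySem.List.pyGetD model i 0 := by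
      rw [beq_iff_eq] at *; omega
    by_cases hji : j > i
    · have : i ≠ j := by omega
      simp [hb, hb', hji, this]
    · simp [hb', hji]
  · have hb' : ¬ (PySem.List.pyGetD model j 0 == PySem.List.pyGetD model i 0) := by
      rw [beq_iff_eq] at *; omega
    simp [hb, hb']
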